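-- pv_equiv track=rewrite | github.com/SMak2000/personal-music-library-ledger | python/music_library_ledger/ytmusic/export_tracks.py | _duration_str_to_ms
-- ===== SOURCE A (Python) =====
-- from typing import Any, Iterable, Optional
--
-- def _duration_str_to_ms(value: Optional[str]) -> Optional[int]:
--     if not value:
--         return None
--     parts = value.split(":")
--     if not parts or any(not p.isdigit() for p in parts):
--         return None
--     total_seconds = 0
--     for part in parts:
--         total_seconds = total_seconds * 60 + int(part)
--     return total_seconds * 1000
-- ===== SOURCE B (Python) =====
-- from typing import Optional
--
-- def _duration_str_to_ms(value: Optional[str]) -> Optional[int]: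
--     if not value:
--         return None
--     secs = _combine(value.split(":"))
--     return None if secs is None else secs * 1000
--
-- def _combine(parts):
--     # parts is nonempty; validate and combine from the right, recursively
--     *rest, last = parts
--     if not last.isdigit():
--         return None
--     if not rest:
--         return int(last)
--     r = _combine(rest)
--     return None if r is None else r * 60 + int(last)
-- ===== Notes on version B (the rewrite author's own statement) =====
-- stated objective: alternative
-- what changed: Replaces the upfront any()-validation pass plus left-to-right Horner fold with a single right-recursive _combine helper that validates each segment inline and chains Option results (r*60+int(last)), with the *1000 applied by the caller.
import Mathlib
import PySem

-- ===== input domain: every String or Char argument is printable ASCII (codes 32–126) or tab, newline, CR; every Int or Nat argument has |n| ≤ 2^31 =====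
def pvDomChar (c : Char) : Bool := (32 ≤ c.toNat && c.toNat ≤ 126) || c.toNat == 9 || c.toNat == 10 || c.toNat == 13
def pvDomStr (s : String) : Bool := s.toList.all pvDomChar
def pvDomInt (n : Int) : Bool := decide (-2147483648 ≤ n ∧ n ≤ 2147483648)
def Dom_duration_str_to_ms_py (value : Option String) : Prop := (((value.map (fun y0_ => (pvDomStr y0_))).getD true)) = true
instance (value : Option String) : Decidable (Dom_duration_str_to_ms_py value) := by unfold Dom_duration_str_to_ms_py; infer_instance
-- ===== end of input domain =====

-- B replaces A's upfront validation pass + Horner fold with a right-recursive Option-chained combine helper; same results, same cost (objective: alternative).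


-- ===== PORT A =====
-- int(p) is only evaluated after isdigit has passed, so ofStr? is always some; getD 0 is unreachable
def duration_str_to_ms_py (value : Option String) : Option Int :=
  match value with
  | none => none
  | some s =>
    if s.toList.isEmpty then none
    else
      -- sep ":" is nonempty, so split? is always some; getD [] is unreachable
      let parts : List String := (PySem.Str.split? s ":").getD []
      if parts.isEmpty || parts.any (fun p => !(PySem.Str.strIsdigit p)) then none
      else
        let total_seconds := parts.foldl (fun acc part => acc * 60 + ((PySem.Int.ofStr? part).getD 0)) 0
        some (total_seconds * 1000)

-- ===== PORT B =====
-- _combine recurses on parts[:-1]; ported over the REVERSED list so that the head is Python's `last`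
-- and the tail is Python's `rest` (structural recursion on the same values)
def pvCombineRev : List String → Option Int
  | [] => none  -- unreachable: _combine is only called on nonempty lists
  | last :: rest =>
    if !(PySem.Str.strIsdigit last) then none
    else
      match rest with
      | [] => some ((PySem.Int.ofStr? last).getD 0)
      | _ :: _ =>
        match pvCombineRev rest with
        | none => none
        | some r => some (r * 60 + ((PySem.Int.ofStr? last).getD 0))

def duration_str_to_ms_py_alt (value : Option String) : Option Int :=
  match value with
  | none => none
  | some s =>
    if s.toList.isEmpty then none
    else
      match pvCombineRev (((PySem.Str.split? s ":").getD []).reverse) with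
      | none => none
      | some secs => some (secs * 1000)

-- ===== PRECONDITION & SPEC =====
def Spec_duration_str_to_ms_py (value : Option String) (out : Option Int) : Prop := out = duration_str_to_ms_py_alt value
instance (value : Option String) (out : Option Int) : Decidable (Spec_duration_str_to_ms_py value out) := by unfold Spec_duration_str_to_ms_py; infer_instance

-- ===== CLAIM (what is proved, stated in full; the proofs are below) =====
def Claim_equal_duration_str_to_ms_py : Prop := ∀ (value : Option String), Dom_duration_str_to_ms_py value → Spec_duration_str_to_ms_py value (duration_str_to_ms_py value)

-- ===== LEMMAS AND PROOFS =====

-- if some segment is not all-digits, the chained combine returns none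
theorem combineRev_none (l : List String) (p : String) (hp : p ∈ l)
    (hbad : PySem.Chars.strIsdigit p.toList = false) : pvCombineRev l = none := by
  induction l with
  | nil => cases hp
  | cons q rest ih =>
    unfold pvCombineRev
    rcases List.mem_cons.mp hp with h | h
    · subst h; simp [hbad]
    · by_cases hq : PySem.Chars.strIsdigit q.toList
      · have hrest : rest ≠ [] := by intro h'; subst h'; cases h
        cases rest with
        | nil => exact absurd rfl hrest
        | cons a as => simp [hq, ih h]
      · simp [hq]

-- on an all-digits nonempty list, combine over the reverse equals A's Horner fold
theorem combineRev_eq_fold (l : List String) (hne : l ≠ [])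
    (hall : ∀ p ∈ l, PySem.Chars.strIsdigit p.toList = true) :
    pvCombineRev l.reverse
      = some (l.foldl (fun acc part => acc * 60 + ((PySem.Int.ofStr? part).getD 0)) 0) := by
  induction l using List.reverseRecOn with
  | nil => exact absurd rfl hne
  | append_singleton front last ih =>
    have hlast : PySem.Chars.strIsdigit last.toList = true := hall last (by simp)
    rw [List.reverse_append, List.reverse_singleton, List.singleton_append]
    cases front with
    | nil => simp [pvCombineRev, hlast]
    | cons f fs =>
      have hallf : ∀ p ∈ f :: fs, PySem.Chars.strIsdigit p.toList = true :=
        fun p hp => hall p (List.mem_append_left _ hp)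
      obtain ⟨a, as, hcr⟩ : ∃ a as, (f :: fs).reverse = a :: as := by
        cases h : (f :: fs).reverse with
        | nil => exact absurd (List.reverse_eq_nil_iff.mp h) (by simp)
        | cons a as => exact ⟨a, as, rfl⟩
      rw [hcr]
      unfold pvCombineRev
      simp only [PySem.Str.strIsdigit_eq, hlast, Bool.not_true, Bool.false_eq_true, if_false]
      rw [← hcr, ih (by simp) hallf]
      simp [List.foldl_append]

-- ===== VERDICT (by name: the statement is the Claim_ definition above) =====
theorem duration_str_to_ms_py_spec : Claim_equal_duration_str_to_ms_py := by
  intro value _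
  unfold Spec_duration_str_to_ms_py
  cases value with
  | none => rfl
  | some s =>
    unfold duration_str_to_ms_py duration_str_to_ms_py_alt
    simp only
    split_ifs with h1 h2
    · rfl
    · -- A returns none; B's combine also yields none
      set parts : List String := (PySem.Str.split? s ":").getD [] with hparts
      have h2' : parts = [] ∨ ∃ p ∈ parts, PySem.Chars.strIsdigit p.toList = false := by
        simpa using h2
      rcases h2' with hE | ⟨p, hp, hpd⟩
      · rw [hE]; simp [pvCombineRev]
      · rw [combineRev_none parts.reverse p (List.mem_reverse.mpr hp) hpd]
    · set parts : List String := (PySem.Str.split? s ":").getD [] with hparts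
      have h2' : ¬(parts = [] ∨ ∃ p ∈ parts, PySem.Chars.strIsdigit p.toList = false) := by
        simpa using h2
      rw [not_or] at h2'
      have hall : ∀ p ∈ parts, PySem.Chars.strIsdigit p.toList = true := by
        intro p hp
        by_contra h
        exact h2'.2 ⟨p, hp, by simpa using h⟩
      rw [combineRev_eq_fold parts h2'.1 hall]
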